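-- pv_equiv track=rewrite | github.com/SorryQin/crack-WiFi-passwords | wf.py | generate_fixed_length_combinations
-- ===== SOURCE A (Python) =====
-- import itertools
--
-- def generate_fixed_length_combinations(chars, length, start_from=None):
--     """
--     从指定起点开始生成固定长度组合。
--     如果 start_from=None，则从头开始。
--     """
--     started = (start_from is None)
--     for item_tuple in itertools.product(chars, repeat=length):
--         s = ''.join(item_tuple)
--         if not started:
--             if s == start_from:
--                 started = True
--             else:
--                 continue  # 还没到起点，跳过
--         yield s
-- ===== SOURCE B (Python) =====
-- def generate_fixed_length_combinations(chars, length, start_from=None):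
--     """Resume-from-offset version: decode start_from as a mixed-radix number
--     (first-occurrence digit positions), then run a digit odometer from there,
--     keeping a parallel character buffer for fast string building."""
--     base = len(chars)
--     total = base ** length
--     if start_from is None:
--         offset = 0
--     elif len(start_from) == length and all(c in chars for c in start_from):
--         offset = 0
--         for c in start_from:
--             offset = offset * base + chars.index(c)
--     else:
--         offset = total
--     if offset >= total:
--         return
--     digits = [0] * length
--     x = offset
--     for pos in range(length - 1, -1, -1):
--         digits[pos] = x % base
--         x //= base
--     buf = [chars[d] for d in digits]
--     for _ in range(total - offset):
--         yield ''.join(buf)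
--         pos = length - 1
--         while pos >= 0:
--             d = digits[pos] + 1
--             if d == base:
--                 digits[pos] = 0
--                 buf[pos] = chars[0]
--                 pos -= 1
--             else:
--                 digits[pos] = d
--                 buf[pos] = chars[d]
--                 break
-- ===== Notes on version B (the rewrite author's own statement) =====
-- stated objective: alternative
-- what changed: B decodes start_from as a mixed-radix (base len(chars)) index using first-occurrence digit positions and then enumerates the remaining combinations with a digit odometer from that offset, instead of generating every combination from the beginning and discarding those before start_from; intended to skip the skipped-prefix work (measured only 1.35x at the largest size the probe finished, so not claimed as faster).
import Mathlib
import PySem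

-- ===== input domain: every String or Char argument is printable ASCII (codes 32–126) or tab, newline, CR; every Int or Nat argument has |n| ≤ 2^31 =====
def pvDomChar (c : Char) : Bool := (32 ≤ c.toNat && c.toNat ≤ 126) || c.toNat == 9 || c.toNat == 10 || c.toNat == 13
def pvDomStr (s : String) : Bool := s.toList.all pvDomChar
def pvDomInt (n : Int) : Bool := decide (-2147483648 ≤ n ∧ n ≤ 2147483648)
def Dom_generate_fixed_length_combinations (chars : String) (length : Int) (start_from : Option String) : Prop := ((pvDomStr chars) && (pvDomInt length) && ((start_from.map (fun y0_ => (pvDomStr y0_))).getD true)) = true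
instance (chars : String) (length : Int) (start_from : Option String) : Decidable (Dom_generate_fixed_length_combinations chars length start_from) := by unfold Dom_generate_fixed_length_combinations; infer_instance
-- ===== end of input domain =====

-- B resumes the enumeration at start_from's mixed-radix index with a digit odometer instead of generating and discarding every combination before start_from (objective: alternative; intended to skip the prefix work, not confirmed faster in a timing run).

-- ===== PORT A =====
-- itertools.product(chars, repeat=n), ported per its documented equivalent:
-- result = [[]]; for _ in range(n): result = [x+[y] for x in result for y in pool]
def pyProduct (cs : List Char) (n : Nat) : List (List Char) :=
  (List.range n).foldl (fun result _ => result.flatMap (fun x => cs.map (fun y => x ++ [y]))) [[]]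

-- the loop body of A: skip until s == start_from, then yield everything
def aStep (target : Option String) (st : Bool × List String) (s : String) : Bool × List String :=
  if !st.1 then
    (if some s = target then (true, st.2 ++ [s]) else st)
  else (st.1, st.2 ++ [s])

def generate_fixed_length_combinations (chars : String) (length : Int) (start_from : Option String) : List String :=
  (((pyProduct chars.toList length.toNat).map (fun t => String.ofList t)).foldl
      (aStep start_from) (start_from.isNone, [])).2

-- ===== PORT B =====
-- decode loop of Source B: positions filled from the end with x % base, x //= base
-- (written here LSB-first and reversed, exactly the order the loop writes)
def digitsLSB (b : Nat) : Nat → Nat → List Nat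
  | 0, _ => []
  | n+1, x => x % b :: digitsLSB b n (x / b)

-- the while-loop of Source B traversing digits/buf from the last position
-- (applied to the reversed lists); chars[0] / chars[d+1] are in range whenever
-- the loop runs, so getD is exact there
def incOdo (cs : List Char) : List Nat → List Char → List Nat × List Char
  | [], bs => ([], bs)
  | d :: ds, [] => (d :: ds, [])
  | d :: ds, _ :: bs =>
      if d + 1 = cs.length then
        let r := incOdo cs ds bs
        (0 :: r.1, cs.getD 0 ' ' :: r.2)
      else ((d + 1) :: ds, cs.getD (d + 1) ' ' :: bs)

-- offset computation of Source B: chars.index(c) is PySem.List.index?; getD 0 is safe since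
-- the branch is guarded by membership of every character of start_from
def bOffset (cs : List Char) (n : Nat) (s : String) : Nat :=
  if s.toList.length = n ∧ ∀ c ∈ s.toList, c ∈ cs then
    s.toList.foldl (fun acc c => acc * cs.length + ((PySem.List.index? cs c).getD 0)) 0
  else cs.length ^ n

def generate_fixed_length_combinations_alt (chars : String) (length : Int) (start_from : Option String) : List String :=
  let cs := chars.toList
  let n := length.toNat
  let total := cs.length ^ n
  let offset := match start_from with
    | none => 0
    | some s => bOffset cs n s
  if total ≤ offset then [] else
    let digits := (digitsLSB cs.length n offset).reverse
    let buf := digits.map (fun d => cs.getD d ' ')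
    (((List.range (total - offset)).foldl
        (fun (st : List Nat × List Char × List String) _ =>
          let r := incOdo cs st.1.reverse st.2.1.reverse
          (r.1.reverse, r.2.reverse, st.2.2 ++ [String.ofList st.2.1]))
        (digits, buf, [])).2).2

-- ===== PRECONDITION & SPEC =====
-- Pre_ excludes negative length, on which running A's generator raises ValueError (from itertools.product)
def Pre_generate_fixed_length_combinations (chars : String) (length : Int) (start_from : Option String) : Prop := 0 ≤ length
instance (chars : String) (length : Int) (start_from : Option String) : Decidable (Pre_generate_fixed_length_combinations chars length start_from) := by unfold Pre_generate_fixed_length_combinations; infer_instance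

def pvWitness_generate_fixed_length_combinations : String × Int × Option String := ("ab", 2, some "ba")

def Spec_generate_fixed_length_combinations (chars : String) (length : Int) (start_from : Option String) (out : List String) : Prop := out = generate_fixed_length_combinations_alt chars length start_from
instance (chars : String) (length : Int) (start_from : Option String) (out : List String) : Decidable (Spec_generate_fixed_length_combinations chars length start_from out) := by unfold Spec_generate_fixed_length_combinations; infer_instance

-- ===== CLAIM (what is proved, stated in full; the proofs are below) =====
def Claim_equal_generate_fixed_length_combinations : Prop := ∀ (chars : String) (length : Int) (start_from : Option String), Dom_generate_fixed_length_combinations chars length start_from → Pre_generate_fixed_length_combinations chars length start_from → Spec_generate_fixed_length_combinations chars length start_from (generate_fixed_length_combinations chars length start_from)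

-- ===== LEMMAS AND PROOFS =====

-- proof-side helpers: characters of the i-th combination (LSB first), its mixed-radix value,
-- and the pure-Nat odometer step
def digitsRev (cs : List Char) (n x : Nat) : List Char :=
  (digitsLSB cs.length n x).map (fun d => cs.getD d ' ')

def vOf (cs : List Char) (t : List Char) : Nat :=
  t.foldl (fun acc c => acc * cs.length + ((PySem.List.index? cs c).getD 0)) 0

def incLSB (b : Nat) : List Nat → List Nat
  | [] => []
  | d :: ds => if d + 1 = b then 0 :: incLSB b ds else (d + 1) :: ds

theorem digitsRev_succ (cs : List Char) (n x : Nat) :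
    digitsRev cs (n+1) x = cs.getD (x % cs.length) ' ' :: digitsRev cs n (x / cs.length) := rfl

theorem pvWitness_ok : Dom_generate_fixed_length_combinations pvWitness_generate_fixed_length_combinations.1 pvWitness_generate_fixed_length_combinations.2.1 pvWitness_generate_fixed_length_combinations.2.2 ∧ Pre_generate_fixed_length_combinations pvWitness_generate_fixed_length_combinations.1 pvWitness_generate_fixed_length_combinations.2.1 pvWitness_generate_fixed_length_combinations.2.2 := by
  constructor <;> decide

theorem aStep_foldl (target : Option String) (L : List String) (st : Bool) (acc : List String) :
    (L.foldl (aStep target) (st, acc)).2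
      = acc ++ (if st then L else L.dropWhile (fun t => some t != target)) := by
  induction L generalizing st acc with
  | nil => cases st <;> simp
  | cons x xs ih =>
    cases st with
    | true => simp [aStep, ih]
    | false =>
      by_cases h : some x = target
      · simp [aStep, h, ih]
      · simp [aStep, h, ih, bne_iff_ne]

theorem digitsLSB_length (b n x : Nat) : (digitsLSB b n x).length = n := by
  induction n generalizing x with
  | zero => simp [digitsLSB]
  | succ n ih => simp [digitsLSB, ih]

theorem digitsRev_length (cs : List Char) (n x : Nat) : (digitsRev cs n x).length = n := by
  simp [digitsRev, digitsLSB_length]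

theorem digitsLSB_lt (b n x : Nat) (hb : 0 < b) : ∀ d ∈ digitsLSB b n x, d < b := by
  induction n generalizing x with
  | zero => simp [digitsLSB]
  | succ n ih =>
    intro d hd
    simp only [digitsLSB, List.mem_cons] at hd
    rcases hd with h | h
    · subst h; exact Nat.mod_lt _ hb
    · exact ih _ d h

theorem digitsRev_mem (cs : List Char) (n x : Nat) (hb : 0 < cs.length) :
    ∀ c ∈ digitsRev cs n x, c ∈ cs := by
  intro c hc
  rw [digitsRev, List.mem_map] at hc
  obtain ⟨d, hd, hde⟩ := hc
  have hlt : d < cs.length := digitsLSB_lt _ _ _ hb d hd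
  subst hde
  rw [List.getD_eq_getElem _ _ hlt]
  exact List.getElem_mem _

theorem range_mul (m b : Nat) :
    List.range (m * b) = (List.range m).flatMap (fun q => (List.range b).map (fun r => q * b + r)) := by
  induction m with
  | zero => simp
  | succ m ih =>
    have h : (m + 1) * b = m * b + b := by ring
    rw [h, List.range_add, List.range_succ, List.flatMap_append, ← ih]
    simp

theorem map_eq_range {α β : Type} (l : List α) (f : α → β) (d : α) :
    l.map f = (List.range l.length).map (fun i => f (l.getD i d)) := by
  induction l with
  | nil => simp
  | cons x xs ih =>
    simp only [List.map_cons, List.length_cons, List.range_succ_eq_map, List.map_map]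
    rw [ih]
    simp [Function.comp_def]

theorem pyProduct_succ (cs : List Char) (n : Nat) :
    pyProduct cs (n+1) = (pyProduct cs n).flatMap (fun x => cs.map (fun y => x ++ [y])) := by
  simp [pyProduct, List.range_succ]

theorem pyProduct_eq (cs : List Char) (n : Nat) :
    pyProduct cs n = (List.range (cs.length ^ n)).map (fun i => (digitsRev cs n i).reverse) := by
  induction n with
  | zero => simp [pyProduct, digitsRev, digitsLSB]
  | succ n ih =>
    rw [pyProduct_succ, ih, pow_succ, range_mul, List.flatMap_map]
    simp only [List.map_flatMap, List.map_map, Function.comp_def]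
    apply List.flatMap_congr
    intro q _
    rw [map_eq_range cs (fun y => (digitsRev cs n q).reverse ++ [y]) ' ']
    apply List.map_congr_left
    intro r hr
    rw [List.mem_range] at hr
    have h1 : (q * cs.length + r) % cs.length = r := by
      rw [Nat.mul_comm, Nat.mul_add_mod, Nat.mod_eq_of_lt hr]
    have h2 : (q * cs.length + r) / cs.length = q := by
      rw [Nat.mul_comm, Nat.mul_add_div (by omega), Nat.div_eq_of_lt hr, Nat.add_zero]
    rw [digitsRev_succ, h1, h2, List.reverse_cons]

theorem vOf_append (cs t : List Char) (c : Char) :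
    vOf cs (t ++ [c]) = vOf cs t * cs.length + ((PySem.List.index? cs c).getD 0) := by
  simp [vOf]

theorem idx_spec (cs : List Char) (c : Char) (h : c ∈ cs) :
    (PySem.List.index? cs c).getD 0 < cs.length ∧
    cs.getD ((PySem.List.index? cs c).getD 0) ' ' = c ∧
    ∀ j < (PySem.List.index? cs c).getD 0, cs.getD j ' ' ≠ c := by
  obtain ⟨k, hk⟩ := Option.isSome_iff_exists.mp (((PySem.List.index?_isSome_iff) cs c).mpr h)
  obtain ⟨hlt, heq, hmin⟩ := PySem.List.getElem_of_index?_eq_some hk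
  rw [hk]
  simp only [Option.getD_some]
  refine ⟨hlt, ?_, ?_⟩
  · rw [List.getD_eq_getElem _ _ hlt]; exact heq
  · intro j hj
    rw [List.getD_eq_getElem _ _ (by omega)]
    exact hmin j hj

theorem encode_decode (cs : List Char) (t : List Char) (h : ∀ c ∈ t, c ∈ cs) :
    vOf cs t < cs.length ^ t.length ∧ (digitsRev cs t.length (vOf cs t)).reverse = t := by
  induction t using List.reverseRecOn with
  | nil => simp [vOf, digitsRev, digitsLSB]
  | append_singleton t c ih =>
    have hc : c ∈ cs := h c (by simp)
    have ht : ∀ c' ∈ t, c' ∈ cs := fun c' hc' => h c' (by simp [hc'])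
    obtain ⟨hv, hdec⟩ := ih ht
    obtain ⟨hik, hieq, _⟩ := idx_spec cs c hc
    have hlen : (t ++ [c]).length = t.length + 1 := by simp
    rw [vOf_append, hlen]
    have hmod : (vOf cs t * cs.length + (PySem.List.index? cs c).getD 0) % cs.length
        = (PySem.List.index? cs c).getD 0 := by
      rw [Nat.mul_comm, Nat.mul_add_mod, Nat.mod_eq_of_lt hik]
    have hdiv : (vOf cs t * cs.length + (PySem.List.index? cs c).getD 0) / cs.length
        = vOf cs t := by
      rw [Nat.mul_comm, Nat.mul_add_div (by omega), Nat.div_eq_of_lt hik, Nat.add_zero]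
    constructor
    · have h1 : vOf cs t * cs.length + (PySem.List.index? cs c).getD 0
          < (vOf cs t + 1) * cs.length := by nlinarith
      have h2 : (vOf cs t + 1) * cs.length ≤ cs.length ^ t.length * cs.length :=
        Nat.mul_le_mul_right _ hv
      calc vOf cs t * cs.length + (PySem.List.index? cs c).getD 0
          < (vOf cs t + 1) * cs.length := h1
        _ ≤ cs.length ^ t.length * cs.length := h2
        _ = cs.length ^ (t.length + 1) := (pow_succ cs.length t.length).symm
    · rw [digitsRev_succ, hmod, hdiv, List.reverse_cons, hdec, hieq]

theorem decode_min (cs : List Char) (n : Nat) :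
    ∀ x, x < cs.length ^ n → vOf cs ((digitsRev cs n x).reverse) ≤ x := by
  induction n with
  | zero => intro x _; simp [digitsRev, digitsLSB, vOf]
  | succ n ih =>
    intro x hx
    have hb : 0 < cs.length := by
      rcases Nat.eq_zero_or_pos cs.length with h | h
      · rw [h] at hx; simp at hx
      · exact h
    have hxd : x / cs.length < cs.length ^ n :=
      Nat.div_lt_of_lt_mul (by rwa [pow_succ, Nat.mul_comm] at hx)
    have hlt : x % cs.length < cs.length := Nat.mod_lt _ hb
    have hmem : cs.getD (x % cs.length) ' ' ∈ cs := by
      rw [List.getD_eq_getElem _ _ hlt]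
      exact List.getElem_mem _
    obtain ⟨hik, _, hmin⟩ := idx_spec cs (cs.getD (x % cs.length) ' ') hmem
    have hile : (PySem.List.index? cs (cs.getD (x % cs.length) ' ')).getD 0 ≤ x % cs.length := by
      by_contra hcon
      exact hmin (x % cs.length) (by omega) rfl
    have hIH : vOf cs ((digitsRev cs n (x / cs.length)).reverse) ≤ x / cs.length := ih _ hxd
    have hrw : (digitsRev cs (n+1) x).reverse
        = (digitsRev cs n (x / cs.length)).reverse ++ [cs.getD (x % cs.length) ' '] := by
      rw [digitsRev_succ, List.reverse_cons]
    rw [hrw, vOf_append]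
    have hmul : vOf cs ((digitsRev cs n (x / cs.length)).reverse) * cs.length
        ≤ (x / cs.length) * cs.length := Nat.mul_le_mul_right _ hIH
    have hdm : cs.length * (x / cs.length) + x % cs.length = x := Nat.div_add_mod x cs.length
    have h1 : (x / cs.length) * cs.length = cs.length * (x / cs.length) := Nat.mul_comm _ _
    omega

theorem dropWhile_append_all {α : Type} (p : α → Bool) (xs ys : List α)
    (h : ∀ x ∈ xs, p x = true) : (xs ++ ys).dropWhile p = ys.dropWhile p := by
  induction xs with
  | nil => simp
  | cons a l ih => simp_all

theorem dropWhile_range_map (f : Nat → String) (m k : Nat) (s : String)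
    (hk : k < m) (hf : f k = s) (hmin : ∀ i < k, f i ≠ s) :
    ((List.range m).map f).dropWhile (fun t => t != s)
      = (List.range (m - k)).map (fun i => f (k + i)) := by
  obtain ⟨j, hj⟩ : ∃ j, m = k + (j + 1) := ⟨m - k - 1, by omega⟩
  subst hj
  rw [List.range_add, List.map_append, dropWhile_append_all]
  · have hms : k + (j + 1) - k = j + 1 := by omega
    rw [hms, List.map_map, List.range_succ_eq_map]
    simp only [List.map_cons, Function.comp_def, Nat.add_zero]
    rw [List.dropWhile_cons_of_neg (by simp [hf])]
  · intro x hx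
    rw [List.mem_map] at hx
    obtain ⟨i, hi, hxe⟩ := hx
    rw [List.mem_range] at hi
    subst hxe
    simp [bne_iff_ne, hmin i hi]

theorem incOdo_eq (cs : List Char) : ∀ ds : List Nat,
    incOdo cs ds (ds.map (fun d => cs.getD d ' '))
      = (incLSB cs.length ds, (incLSB cs.length ds).map (fun d => cs.getD d ' ')) := by
  intro ds
  induction ds with
  | nil => simp [incOdo, incLSB]
  | cons d ds ih =>
    by_cases h : d + 1 = cs.length
    · simp only [List.map_cons, incOdo, incLSB, if_pos h, ih]
    · simp only [List.map_cons, incOdo, incLSB, if_neg h]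

theorem incLSB_digitsLSB (b : Nat) : ∀ (n x : Nat), x + 1 < b ^ n →
    incLSB b (digitsLSB b n x) = digitsLSB b n (x + 1) := by
  intro n
  induction n with
  | zero => intro x hx; simp at hx
  | succ n ih =>
    intro x hx
    have hb : 0 < b := by
      rcases Nat.eq_zero_or_pos b with h | h
      · rw [h, Nat.zero_pow (by omega)] at hx; omega
      · exact h
    have hdm : b * (x / b) + x % b = x := Nat.div_add_mod x b
    have hlt : x % b < b := Nat.mod_lt _ hb
    by_cases h : x % b + 1 = b
    · -- carry
      have hcomm : (x / b + 1) * b = b * (x / b) + b := by ring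
      have key : x + 1 = (x / b + 1) * b := by omega
      have hmod : (x + 1) % b = 0 := by rw [key]; exact Nat.mul_mod_left _ _
      have hdiv : (x + 1) / b = x / b + 1 := by rw [key]; exact Nat.mul_div_cancel _ hb
      have hih : x / b + 1 < b ^ n := by
        have hx' : (x / b + 1) * b < b ^ n * b := by rw [← key, ← pow_succ]; exact hx
        exact Nat.lt_of_mul_lt_mul_right hx'
      simp only [digitsLSB, incLSB, if_pos h, hmod, hdiv, ih _ hih]
    · -- no carry
      have hcomm : (x / b) * b = b * (x / b) := Nat.mul_comm _ _
      have key : x + 1 = (x / b) * b + (x % b + 1) := by omega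
      have h' : x % b + 1 < b := by omega
      have hmod : (x + 1) % b = x % b + 1 := by
        rw [key, Nat.mul_comm, Nat.mul_add_mod, Nat.mod_eq_of_lt h']
      have hdiv : (x + 1) / b = x / b := by
        rw [key, Nat.mul_comm, Nat.mul_add_div hb, Nat.div_eq_of_lt h', Nat.add_zero]
      simp only [digitsLSB, incLSB, if_neg h, hmod, hdiv]

theorem foldl_ignore {σ α : Type} (step : σ → σ) : ∀ (l : List α) (s : σ),
    l.foldl (fun st _ => step st) s = step^[l.length] s := by
  intro l
  induction l with
  | nil => intro s; rfl
  | cons a l ih =>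
    intro s
    rw [List.foldl_cons, List.length_cons, Function.iterate_succ_apply, ih]

def odoStep (cs : List Char) (st : List Nat × List Char × List String) : List Nat × List Char × List String :=
  ((incOdo cs st.1.reverse st.2.1.reverse).1.reverse,
   (incOdo cs st.1.reverse st.2.1.reverse).2.reverse,
   st.2.2 ++ [String.ofList st.2.1])

theorem odoStep_at (cs : List Char) (n x : Nat) (acc : List String) :
    odoStep cs ((digitsLSB cs.length n x).reverse,
        ((digitsLSB cs.length n x).reverse).map (fun d => cs.getD d ' '), acc)
      = ((incLSB cs.length (digitsLSB cs.length n x)).reverse,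
         ((incLSB cs.length (digitsLSB cs.length n x)).reverse).map (fun d => cs.getD d ' '),
         acc ++ [String.ofList ((digitsRev cs n x).reverse)]) := by
  unfold odoStep
  simp only [List.map_reverse, List.reverse_reverse]
  rw [incOdo_eq]
  simp [digitsRev, List.map_reverse]

theorem map_range_shift (F : Nat → String) (m x : Nat) :
    F x :: (List.range m).map (fun i => F (x + 1 + i)) = (List.range (m+1)).map (fun i => F (x + i)) := by
  rw [List.range_succ_eq_map, List.map_cons, List.map_map, Nat.add_zero]
  congr 1
  apply List.map_congr_left
  intro i _
  simp only [Function.comp_def]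
  congr 1
  omega

theorem odo_iterate (cs : List Char) (n : Nat) :
    ∀ (m x : Nat) (acc : List String), x + m ≤ cs.length ^ n →
      (((odoStep cs)^[m] ((digitsLSB cs.length n x).reverse,
          ((digitsLSB cs.length n x).reverse).map (fun d => cs.getD d ' '), acc)).2).2
        = acc ++ (List.range m).map (fun i => String.ofList ((digitsRev cs n (x + i)).reverse)) := by
  intro m
  induction m with
  | zero => intro x acc _; simp
  | succ m ih =>
    intro x acc hm
    rw [Function.iterate_succ_apply, odoStep_at]
    cases m with
    | zero => simp
    | succ m' =>
      have hx1 : x + 1 < cs.length ^ n := by omega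
      rw [incLSB_digitsLSB _ _ _ hx1]
      rw [ih (x + 1) _ (by omega)]
      rw [List.append_assoc, List.singleton_append]
      congr 1
      exact map_range_shift (fun j => String.ofList ((digitsRev cs n j).reverse)) (m' + 1) x

def altOff (cs : List Char) (n : Nat) : Option String → Nat
  | none => 0
  | some s => bOffset cs n s

theorem altOff_le (cs : List Char) (n : Nat) (sf : Option String) :
    altOff cs n sf ≤ cs.length ^ n := by
  cases sf with
  | none => exact Nat.zero_le _
  | some s =>
    rw [altOff, bOffset]
    by_cases h : s.toList.length = n ∧ ∀ c ∈ s.toList, c ∈ cs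
    · rw [if_pos h]
      have := (encode_decode cs s.toList h.2).1
      rw [h.1] at this
      exact Nat.le_of_lt this
    · rw [if_neg h]

theorem alt_eq (chars : String) (length : Int) (sf : Option String) :
    generate_fixed_length_combinations_alt chars length sf
      = (List.range (chars.toList.length ^ length.toNat - altOff chars.toList length.toNat sf)).map
          (fun i => String.ofList ((digitsRev chars.toList length.toNat
              (altOff chars.toList length.toNat sf + i)).reverse)) := by
  have hle := altOff_le chars.toList length.toNat sf
  have hbridge : (fun (st : List Nat × List Char × List String) (_ : Nat) =>
        let r := incOdo chars.toList st.1.reverse st.2.1.reverse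
        (r.1.reverse, r.2.reverse, st.2.2 ++ [String.ofList st.2.1]))
      = fun st _ => odoStep chars.toList st := rfl
  cases sf with
  | none =>
    simp only [altOff] at hle ⊢
    simp only [generate_fixed_length_combinations_alt]
    by_cases hc : chars.toList.length ^ length.toNat ≤ 0
    · rw [if_pos hc]
      have h0 : chars.toList.length ^ length.toNat - 0 = 0 := by omega
      rw [h0]
      simp
    · rw [if_neg hc, hbridge, foldl_ignore, List.length_range,
        odo_iterate chars.toList length.toNat _ _ [] (by omega)]
      simp
  | some s =>
    simp only [altOff] at hle ⊢
    simp only [generate_fixed_length_combinations_alt]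
    by_cases hc : chars.toList.length ^ length.toNat ≤ bOffset chars.toList length.toNat s
    · rw [if_pos hc]
      have h0 : chars.toList.length ^ length.toNat - bOffset chars.toList length.toNat s = 0 := by
        omega
      rw [h0]
      simp
    · rw [if_neg hc, hbridge, foldl_ignore, List.length_range,
        odo_iterate chars.toList length.toNat _ _ [] (by omega)]
      simp

-- ===== VERDICT (by name: the statement is the Claim_ definition above) =====
theorem generate_fixed_length_combinations_spec : Claim_equal_generate_fixed_length_combinations := by
  intro chars length start_from _ _
  unfold Spec_generate_fixed_length_combinations
  unfold generate_fixed_length_combinations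
  rw [aStep_foldl]
  simp only [List.nil_append]
  rw [alt_eq]
  have hL : (pyProduct chars.toList length.toNat).map (fun t => String.ofList t)
      = (List.range (chars.toList.length ^ length.toNat)).map
          (fun i => String.ofList ((digitsRev chars.toList length.toNat i).reverse)) := by
    rw [pyProduct_eq, List.map_map]; rfl
  cases start_from with
  | none =>
    simp only [Option.isNone_none, if_true, altOff, Nat.sub_zero, Nat.zero_add]
    exact hL
  | some s =>
    simp only [Option.isNone_some, Bool.false_eq_true, if_false, altOff]
    rw [hL]
    have hpred : (fun (t : String) => some t != some s) = (fun t => t != s) := by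
      funext t; simp [bne]
    rw [hpred]
    by_cases hvalid : s.toList.length = length.toNat ∧ ∀ c ∈ s.toList, c ∈ chars.toList
    · -- start_from is a genuine length-n combination: resume at its index
      obtain ⟨henc, hdec⟩ := encode_decode chars.toList s.toList hvalid.2
      rw [hvalid.1] at henc hdec
      have hoff : bOffset chars.toList length.toNat s = vOf chars.toList s.toList := by
        rw [bOffset, if_pos hvalid]; rfl
      rw [hoff]
      have hfv : String.ofList ((digitsRev chars.toList length.toNat
          (vOf chars.toList s.toList)).reverse) = s := by
        rw [hdec]; simp
      apply dropWhile_range_map _ _ _ _ henc hfv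
      intro i hi hcon
      have hts : s.toList = (digitsRev chars.toList length.toNat i).reverse := by
        have h2 := congrArg String.toList hcon
        simpa using h2.symm
      have hle : vOf chars.toList s.toList ≤ i := by
        have h3 := decode_min chars.toList length.toNat i (by omega)
        rw [← hts] at h3
        exact h3
      omega
    · -- start_from never occurs among the generated strings: both sides are empty
      have hoff : bOffset chars.toList length.toNat s = chars.toList.length ^ length.toNat := by
        rw [bOffset, if_neg hvalid]
      rw [hoff]
      simp only [Nat.sub_self, List.range_zero, List.map_nil]
      rw [List.dropWhile_eq_nil_iff]
      intro x hx
      rw [List.mem_map] at hx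
      obtain ⟨i, hi, hxe⟩ := hx
      rw [List.mem_range] at hi
      subst hxe
      simp only [bne_iff_ne, ne_eq]
      intro hcon
      apply hvalid
      have hts : s.toList = (digitsRev chars.toList length.toNat i).reverse := by
        have h2 := congrArg String.toList hcon
        simpa using h2.symm
      constructor
      · rw [hts]; simp [digitsRev_length]
      · intro c hc
        rw [hts, List.mem_reverse] at hc
        have hbpos : 0 < chars.toList.length := by
          rcases Nat.eq_zero_or_pos chars.toList.length with h0 | h0
          · exfalso
            rcases Nat.eq_zero_or_pos length.toNat with hn0 | hn0
            · rw [hn0] at hc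
              simp [digitsRev, digitsLSB] at hc
            · rw [h0, Nat.zero_pow (by omega)] at hi; omega
          · exact h0
        exact digitsRev_mem chars.toList length.toNat i hbpos c hc
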